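-- pv_equiv track=rewrite | github.com/govwiki/GovernmentEntityScraper | search.py | is_isd
-- ===== SOURCE A (Python) =====
-- def is_isd(queryWords : list) -> bool:
--     """
--         Does the Google search query pertain to an ISD (Independent School District)
--     """
--     ind = False
--     sch = False
--     isd_abbrev = False
--     for word in queryWords:
--         if word == 'independent':
--             ind = True
--         elif word == 'school':
--             sch = True
--         elif word == 'isd':
--             return True
--     return ind and sch
-- ===== SOURCE B (Python) =====
-- def is_isd(queryWords : list) -> bool:
--     """
--         Does the Google search query pertain to an ISD (Independent School District)
--     """
--     return 'isd' in queryWords or ('independent' in queryWords and 'school' in queryWords)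
-- ===== Notes on version B (the rewrite author's own statement) =====
-- stated objective: simpler
-- what changed: Replaced the stateful flag-accumulating loop with a direct boolean expression over three membership tests (short-circuiting).
import Mathlib
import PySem

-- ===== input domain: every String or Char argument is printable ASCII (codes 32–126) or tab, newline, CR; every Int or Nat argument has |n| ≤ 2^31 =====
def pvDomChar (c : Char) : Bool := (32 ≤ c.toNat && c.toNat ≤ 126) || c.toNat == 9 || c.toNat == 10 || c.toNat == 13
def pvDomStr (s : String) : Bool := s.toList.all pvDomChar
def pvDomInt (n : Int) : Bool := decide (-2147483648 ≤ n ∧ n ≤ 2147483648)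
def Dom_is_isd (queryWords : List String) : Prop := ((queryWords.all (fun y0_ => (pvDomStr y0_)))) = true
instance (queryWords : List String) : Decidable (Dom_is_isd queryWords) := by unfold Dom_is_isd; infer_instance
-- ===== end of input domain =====

-- B replaces A's single-pass three-flag loop by a direct boolean expression of three membership tests (simpler).

-- ===== PORT A =====
-- the loop carrying the flags ind, sch (isd_abbrev is never set in A; early return on 'isd')
def is_isd_loop (ind sch : Bool) : List String → Bool
  | [] => ind && sch
  | word :: rest =>
    if word = "independent" then is_isd_loop true sch rest
    else if word = "school" then is_isd_loop ind true rest
    else if word = "isd" then true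
    else is_isd_loop ind sch rest

def is_isd (queryWords : List String) : Bool := is_isd_loop false false queryWords

-- ===== PORT B =====
def is_isd_alt (queryWords : List String) : Bool :=
  queryWords.contains "isd" || (queryWords.contains "independent" && queryWords.contains "school")

-- ===== PRECONDITION & SPEC =====
def Spec_is_isd (queryWords : List String) (out : Bool) : Prop := out = is_isd_alt queryWords
instance (queryWords : List String) (out : Bool) : Decidable (Spec_is_isd queryWords out) := by unfold Spec_is_isd; infer_instance

-- ===== CLAIM (what is proved, stated in full; the proofs are below) =====
def Claim_equal_is_isd : Prop := ∀ (queryWords : List String), Dom_is_isd queryWords → Spec_is_isd queryWords (is_isd queryWords)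

-- ===== LEMMAS AND PROOFS =====
theorem is_isd_loop_eq (ws : List String) : ∀ (ind sch : Bool),
    is_isd_loop ind sch ws =
      (ws.contains "isd" || ((ind || ws.contains "independent") && (sch || ws.contains "school"))) := by
  induction ws with
  | nil => intro ind sch; simp [is_isd_loop]
  | cons w rest ih =>
    intro ind sch
    simp only [is_isd_loop]
    by_cases h1 : w = "independent"
    · subst h1
      simp [ih, List.contains_cons] <;> cases ind <;> cases sch <;>
        simp <;> cases rest.contains "isd" <;> simp [Bool.or_comm, Bool.or_left_comm]
    · by_cases h2 : w = "school"
      · subst h2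
        simp [ih, List.contains_cons] <;> cases ind <;> cases sch <;> simp
      · by_cases h3 : w = "isd"
        · subst h3
          simp [List.contains_cons]
        · simp [ih, List.contains_cons, Ne.symm h1, Ne.symm h2, Ne.symm h3, h1, h2, h3]

-- ===== VERDICT (by name: the statement is the Claim_ definition above) =====
theorem is_isd_spec : Claim_equal_is_isd := by
  intro ws _
  unfold Spec_is_isd is_isd is_isd_alt
  simp [is_isd_loop_eq]
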